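/- GENERATED by tools/from_farm_form.py from farm/worked/store_sum/Proof.lean (a worked proof of the farm's unit `store_sum`,
   accepted by the verdict) — do not edit. -/
import Toy.Spec.Units.store_sum
open X86 X86.User Asan ProgX.Base

set_option maxRecDepth 4000
set_option maxHeartbeats 4000000

namespace Toy.Spec.Proved.store_sum
open Toy.Spec.store_sum (Statement)

/-- `movsxd rbp, ebx` at 0x105342: the counter `k ≤ 8` sign-extends to itself. -/
theorem store_sext_small_w : ∀ i, i ≤ 8 →
    Word.ofBV (BitVec.signExtend 64 (Word.part Width.w32 (UInt64.ofNat i))) = UInt64.ofNat i := by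
  decide

/-- `add ebx, 1` at 0x105354: the counter `k ≤ 8` does not wrap. -/
theorem store_inc_small_w : ∀ i, i ≤ 8 →
    Word.ofBV (Word.part Width.w32 (UInt64.ofNat i) + 1#32) = UInt64.ofNat (i + 1) := by
  decide

/-- `cmp ebx, 7 ; jle` at 0x105357: the signed comparison of the counter `k ≤ 8` is the one of numbers. -/
theorem store_jle_small_w : ∀ i, i ≤ 8 →
    ((Word.part Width.w32 (UInt64.ofNat i)).toInt ≤ (7#32).toInt ↔ i ≤ 7) := by
  decide
end Toy.Spec.Proved.store_sum

/-- `store_sum` satisfies its contract. -/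
theorem Toy.Spec.Proved.store_sum_ok : Toy.Spec.store_sum.Statement := by
  intro Lay hLay μ hμ u₀ hcode hstore1 others frames u ret he hpre
  v_entry he
  obtain ⟨hsh, hlive⟩ := hpre
  have hsp := hsh.rsp
  have hwhere : 0x140000 ≤ (u.reg .rdi).toNat ∧ (u.reg .rdi).toNat + 8 ≤ 0xC00000 ∧
        ((u.reg .rsp).toNat + 8 ≤ (u.reg .rdi).toNat ∨ (u.reg .rdi).toNat + 8 ≤ 0x700000 ∨
          0x800000 ≤ (u.reg .rdi).toNat) :=
    hlive.where_ hsh.inv hsh.offText (by omega)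
  u_walk hcode [hμ.vendor] until [Toy.L.store_sum.loop1] span [ProgX.Base.L.textLo, ProgX.Base.L.textHi] side (v_side)
  obtain ⟨i, hi, hile⟩ : ∃ i : Nat, s_105333.reg .rbx = UInt64.ofNat i ∧ i ≤ 8 :=
    ⟨0, w_rbx, Nat.zero_le _⟩
  have hsame : Mem.SameExcept [⟨(u.reg .rsp).toNat - 64, (u.reg .rsp).toNat⟩,
      ⟨(u.reg .rdi).toNat, (u.reg .rdi).toNat + 8⟩] u.mem s_105333.mem := by
    u_same
  have hun : ShadowUntouched u.mem s_105333.mem := by v_untouched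
  have hs1 : UInt64.ofNat (s_105333.mem.readLE (u.reg .rsp - 8) 8) = u.reg .r14 := by u_resolve
  have hs2 : UInt64.ofNat (s_105333.mem.readLE (u.reg .rsp - 16) 8) = u.reg .r13 := by u_resolve
  have hs3 : UInt64.ofNat (s_105333.mem.readLE (u.reg .rsp - 24) 8) = u.reg .r12 := by u_resolve
  have hs4 : UInt64.ofNat (s_105333.mem.readLE (u.reg .rsp - 32) 8) = u.reg .rbp := by u_resolve
  have hs5 : UInt64.ofNat (s_105333.mem.readLE (u.reg .rsp - 40) 8) = u.reg .rbx := by u_resolve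
  have hs0 : UInt64.ofNat (s_105333.mem.readLE (u.reg .rsp) 8) = ret := by u_resolve
  have hdf : s_105333.flags .df = false := by
    rw [w_flags]
    exact he_df
  replace w_kept := w_kept.mono_all (S' := [.rbx, .r13, .r14, .r12, .rsp, .rbp, .rdi, .rax, .rcx, .rdx]) (by rfl)
  clear w_mem w_flags w_rbx
  u_loop [i] (fun v => 8 - (v.reg .rbx).toNat)
  u_walk hcode [hμ.vendor] until [Toy.L.store_sum.loop1] span [ProgX.Base.L.textLo, ProgX.Base.L.textHi] side (v_side)
  · -- 0x10534b, toy.c:61: the check of the store `out[k]`: the byte is inside the 8 live bytes at `out`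
    have hk : i ≤ 7 := (Toy.Spec.Proved.store_sum.store_jle_small_w i hile).mp hbr_10535a
    rw [Toy.Spec.Proved.store_sum.store_sext_small_w i hile]
    obtain ⟨hw1, hw2, hw3⟩ := hwhere
    have hun' : ShadowUntouched u.mem s_10534b.mem := by v_untouched
    exact hlive.accSmall hsh.inv hun' _ 1 (by decide) (by u_omega) (by u_omega)
  · -- 0x105350: the store must miss the text: `out` is at or above the end of the text
    have hk : i ≤ 7 := (Toy.Spec.Proved.store_sum.store_jle_small_w i hile).mp hbr_10535a
    rw [Toy.Spec.Proved.store_sum.store_sext_small_w i hile]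
    obtain ⟨hw1, hw2, hw3⟩ := hwhere
    right
    u_omega
  · -- 0x105354 → 0x105357: the back edge
    have hk : i ≤ 7 := (Toy.Spec.Proved.store_sum.store_jle_small_w i hile).mp hbr_10535a
    rw [Toy.Spec.Proved.store_sum.store_sext_small_w i hile] at w_mem w_acc_10534b
    obtain ⟨hw1, hw2, hw3⟩ := hwhere
    u_loop_back [i + 1]
    · -- the counter: `add ebx, 1` does not wrap
      rw [w_rbx]
      exact Toy.Spec.Proved.store_sum.store_inc_small_w i hile
    · omega
    · -- still no store to the shadow
      v_untouched
    · -- the direction flag: the check kept it (`w_df_10534b`), the `add` wrote status flags only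
      rw [w_flags]
      simp only [X86.User.df_setStatus]
      assumption
    · -- the measure: 8 - k
      rw [w_rbx, Toy.Spec.Proved.store_sum.store_inc_small_w i hile]
      u_omega
  · -- 0x10535c … 0x105364: the exit, walked to the `ret`
    refine ReachVia.done (Or.inl ?_)
    v_returned
    -- the post: no store went to the shadow
    show ShadowUntouched u.mem s_105364.mem
    rw [w_mem]
    exact hun
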